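-- pv_equiv track=rewrite | github.com/erizov/Trendoscope | src/trendascope/nlp/context_aggregator.py | _extract_narrative
-- ===== SOURCE A (Python) =====
-- from typing import List, Dict, Any, Optional
--
-- def _extract_narrative(
--
--     cluster: List[Dict[str, Any]]
-- ) -> str:
--     """Extract main narrative from cluster."""
--     if not cluster:
--         return ""
--
--     # Use the most recent or most detailed item
--     sorted_cluster = sorted(
--         cluster,
--         key=lambda x: len(x.get('summary', '')),
--         reverse=True
--     )
--
--     main_item = sorted_cluster[0]
--
--     narrative = f"{main_item.get('title', '')}\n\n"
--     narrative += main_item.get('summary', '')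
--
--     # Add supporting details from other items
--     if len(cluster) > 1:
--         narrative += "\n\nДополнительно:\n"
--         for item in sorted_cluster[1:3]:  # Add up to 2 more
--             narrative += f"- {item.get('title', '')} ({item.get('source', '')})\n"
--
--     return narrative
-- ===== SOURCE B (Python) =====
-- def _extract_narrative(cluster):
--     """Extract main narrative from cluster (one-pass top-3 selection instead of a full sort)."""
--     if not cluster:
--         return ""
--
--     # Single pass: keep at most 3 items, stably ordered by descending summary length.
--     top = []
--     for item in cluster:
--         k = len(item.get('summary', ''))
--         i = 0
--         while i < len(top) and len(top[i].get('summary', '')) >= k: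
--             i += 1
--         top.insert(i, item)
--         if len(top) > 3:
--             top.pop()
--
--     main_item = top[0]
--     parts = [main_item.get('title', ''), "\n\n", main_item.get('summary', '')]
--     if len(cluster) > 1:
--         parts.append("\n\nДополнительно:\n")
--         for item in top[1:3]:
--             parts.append(f"- {item.get('title', '')} ({item.get('source', '')})\n")
--     return "".join(parts)
-- ===== Notes on version B (the rewrite author's own statement) =====
-- stated objective: alternative
-- what changed: Replaces the full stable reverse sort of the cluster with a single-pass bounded top-3 insertion (keeping at most 3 items), and builds the narrative with one join over a parts list instead of repeated string concatenation.
import Mathlib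
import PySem

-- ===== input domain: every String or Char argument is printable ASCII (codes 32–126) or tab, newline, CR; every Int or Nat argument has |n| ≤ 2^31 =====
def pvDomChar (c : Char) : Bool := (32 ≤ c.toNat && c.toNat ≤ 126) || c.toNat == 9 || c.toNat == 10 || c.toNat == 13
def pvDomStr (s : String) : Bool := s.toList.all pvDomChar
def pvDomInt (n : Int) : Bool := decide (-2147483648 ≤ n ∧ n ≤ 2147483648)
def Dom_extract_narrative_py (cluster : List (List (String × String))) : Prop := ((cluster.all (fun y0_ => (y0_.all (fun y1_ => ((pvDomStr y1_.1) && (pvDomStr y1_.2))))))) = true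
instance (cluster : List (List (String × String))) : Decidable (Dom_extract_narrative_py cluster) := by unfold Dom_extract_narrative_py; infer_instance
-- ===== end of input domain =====

-- B replaces the full reverse sort of the cluster by a single-pass stable top-3 selection and
-- assembles the narrative with one join instead of repeated concatenation (objective: alternative).

-- ===== PORT A =====
-- item.get(k, '') on a dict given as an association list (insertion order, first match)
def pvGet (d : List (String × String)) (k : String) : String :=
  match d.find? (fun p => p.1 == k) with
  | some p => p.2
  | none => ""

-- the sort key len(x.get('summary','')) shared by both Pythons
def pvKey (x : List (String × String)) : Int := PySem.Str.len (pvGet x "summary")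

-- the supporting line f"- {title} ({source})\n" both Pythons format
def pvLine (item : List (String × String)) : String :=
  "- " ++ pvGet item "title" ++ " (" ++ pvGet item "source" ++ ")\n"

def extract_narrative_py (cluster : List (List (String × String))) : String :=
  if cluster = [] then ""
  else
    let sorted_cluster := PySem.List.sorted cluster pvKey true
    let main_item := sorted_cluster.headD []
    let narrative := pvGet main_item "title" ++ "\n\n" ++ pvGet main_item "summary"
    if 1 < cluster.length then
      (PySem.List.slice sorted_cluster (some 1) (some 3)).foldl
        (fun acc item => acc ++ pvLine item)
        (narrative ++ "\n\nДополнительно:\n")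
    else
      narrative

-- ===== PORT B =====
-- the inner while/insert: walk past items whose summary is at least as long, insert there
def pvInsertTop (x : List (String × String)) :
    List (List (String × String)) → List (List (String × String))
  | [] => [x]
  | y :: ys => if pvKey x ≤ pvKey y then y :: pvInsertTop x ys else x :: y :: ys

-- one loop body: insert, then pop the last element if more than 3 are kept
def pvStep (t : List (List (String × String))) (item : List (String × String)) :
    List (List (String × String)) :=
  let t' := pvInsertTop item t
  if 3 < t'.length then t'.dropLast else t'

def extract_narrative_py_alt (cluster : List (List (String × String))) : String :=
  if cluster = [] then ""
  else
    let top := cluster.foldl pvStep []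
    let main_item := top.headD []
    let parts := [pvGet main_item "title", "\n\n", pvGet main_item "summary"]
    let parts := if 1 < cluster.length then
        parts ++ ["\n\nДополнительно:\n"] ++ (PySem.List.slice top (some 1) (some 3)).map pvLine
      else parts
    PySem.Str.join "" parts

-- ===== PRECONDITION & SPEC =====
def Spec_extract_narrative_py (cluster : List (List (String × String))) (out : String) : Prop := out = extract_narrative_py_alt cluster
instance (cluster : List (List (String × String))) (out : String) : Decidable (Spec_extract_narrative_py cluster out) := by unfold Spec_extract_narrative_py; infer_instance

-- ===== CLAIM (what is proved, stated in full; the proofs are below) =====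
def Claim_equal_extract_narrative_py : Prop := ∀ (cluster : List (List (String × String))), Dom_extract_narrative_py cluster → Spec_extract_narrative_py cluster (extract_narrative_py cluster)

-- ===== LEMMAS AND PROOFS =====

-- B's hand-written insertion is A's stable reverse insertion step
theorem pvInsertTop_eq (x : List (String × String)) (t : List (List (String × String))) :
    pvInsertTop x t = PySem.List.insertBy (fun a b => decide (pvKey b < pvKey a)) x t := by
  induction t with
  | nil => rfl
  | cons y ys ih =>
    by_cases h : pvKey x ≤ pvKey y
    · simp [pvInsertTop, PySem.List.insertBy, h, not_lt.mpr h, ih]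
    · simp [pvInsertTop, PySem.List.insertBy, h, not_le.mp h]

theorem pvLength_insertBy {α : Type} (p : α → α → Bool) (x : α) (s : List α) :
    (PySem.List.insertBy p x s).length = s.length + 1 := by
  induction s with
  | nil => rfl
  | cons y ys ih =>
    simp only [PySem.List.insertBy]
    split <;> simp [ih]

-- truncating before or after an insertion makes no difference
theorem pvTake_insertBy {α : Type} (p : α → α → Bool) (x : α) (s : List α) (n : Nat) :
    (PySem.List.insertBy p x s).take n = (PySem.List.insertBy p x (s.take n)).take n := by
  induction s generalizing n with
  | nil => simp
  | cons y ys ih =>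
    cases n with
    | zero => simp
    | succ m =>
      simp only [PySem.List.insertBy, List.take_succ_cons]
      split
      · cases m with
        | zero => simp
        | succ k =>
          simp only [List.take_succ_cons, List.cons.injEq, true_and]
          rw [List.take_take, Nat.min_eq_left (Nat.le_succ k)]
      · simp [List.take_succ_cons, ih]

-- the one-pass loop computes take 3 of the stable reverse insertion sort
theorem pvFold_eq (xs : List (List (String × String))) :
    ∀ acc, xs.foldl pvStep (acc.take 3) =
      (xs.foldl (fun a x => PySem.List.insertBy (fun a b => decide (pvKey b < pvKey a)) x a) acc).take 3 := by
  induction xs with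
  | nil => intro acc; simp
  | cons x xs ih =>
    intro acc
    have h1 : pvStep (acc.take 3) x =
        (PySem.List.insertBy (fun a b => decide (pvKey b < pvKey a)) x (acc.take 3)).take 3 := by
      simp only [pvStep, pvInsertTop_eq]
      have hlen := pvLength_insertBy (fun a b => decide (pvKey b < pvKey a)) x (acc.take 3)
      have hle : (acc.take 3).length ≤ 3 := by simp
      split
      · rename_i h
        have h4 : (PySem.List.insertBy (fun a b => decide (pvKey b < pvKey a)) x (acc.take 3)).length = 4 := by omega
        rw [List.dropLast_eq_take, h4]
      · rename_i h
        exact (List.take_of_length_le (by omega)).symm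
    have hstep : pvStep (acc.take 3) x =
        (PySem.List.insertBy (fun a b => decide (pvKey b < pvKey a)) x acc).take 3 := by
      rw [h1, ← pvTake_insertBy]
    simp only [List.foldl_cons, hstep, ih]

theorem pvHeadD_take {α : Type} (l : List α) (d : α) : (l.take 3).headD d = l.headD d := by
  cases l <;> simp

theorem pvJoin_empty_cons (a : String) (l : List String) :
    PySem.Str.join "" (a :: l) = a ++ PySem.Str.join "" l := by
  cases l with
  | nil => simp [PySem.Str.join, PySem.Chars.join, List.intercalate, String.ofList_toList]
  | cons b t =>
    simp [PySem.Str.join, PySem.Chars.join, List.intercalate,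
      String.ofList_append, String.ofList_toList]

theorem pvFoldl_append_join (l : List (List (String × String))) :
    ∀ p : String, l.foldl (fun acc i => acc ++ pvLine i) p = p ++ PySem.Str.join "" (l.map pvLine) := by
  induction l with
  | nil => intro p; simp [PySem.Str.join, PySem.Chars.join, List.intercalate]
  | cons x xs ih =>
    intro p
    simp only [List.foldl_cons, List.map_cons, ih, pvJoin_empty_cons, String.append_assoc]

-- ===== VERDICT (by name: the statement is the Claim_ definition above) =====
theorem extract_narrative_py_spec : Claim_equal_extract_narrative_py := by
  intro cluster _
  unfold Spec_extract_narrative_py extract_narrative_py extract_narrative_py_alt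
  by_cases hc : cluster = []
  · simp [hc]
  · simp only [hc, ite_false]
    have htop : cluster.foldl pvStep [] = (PySem.List.sorted cluster pvKey true).take 3 := by
      rw [PySem.List.sorted_rev_eq_foldl_insertBy]
      simpa using pvFold_eq cluster []
    set S := PySem.List.sorted cluster pvKey true with hS
    have hslice : ∀ l : List (List (String × String)),
        PySem.List.slice l (some 1) (some 3) = (l.drop 1).take 2 := by
      intro l
      rw [PySem.List.slice_toNat (ha := by norm_num) (hb := by norm_num)]
      norm_num
      omega
    have hslice_top : PySem.List.slice (S.take 3) (some 1) (some 3) =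
        PySem.List.slice S (some 1) (some 3) := by
      rw [hslice, hslice, List.drop_take]
      simp [List.take_take]
    rw [htop, pvHeadD_take, hslice_top]
    by_cases hlen : 1 < cluster.length
    · simp only [hlen, if_pos]
      rw [pvFoldl_append_join]
      simp [pvJoin_empty_cons, String.append_assoc]
    · simp only [hlen, ite_false]
      rw [pvJoin_empty_cons, pvJoin_empty_cons, pvJoin_empty_cons,
        show PySem.Str.join "" ([] : List String) = "" from rfl]
      simp [String.append_assoc]
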